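-- pv_equiv track=rewrite | github.com/jayelmeynak/LeetCode | stepenator_2035.py | solve
-- ===== SOURCE A (Python) =====
-- def solve(k):
--     if k == 1:
--         return 1
--     count = 0
--     left = (k + 1) // 2
--     for L in range(left, k):
--         r = k - L
--         if r < 1 or r > L:
--             continue
--         for b in range(2**(L-1), 2**L):
--             if count_func_cal(b) == k:
--                 count += 1
--     return count % (10**9 + 7)
--
-- def count_func_cal(b):
--     bin_b = bin(b)[2:]
--     l = len(bin_b)  # число битов
--     r = bin_b.count('1')  # число единиц
--     return r + l
-- ===== SOURCE B (Python) =====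
-- def solve(k):
--     if k == 1:
--         return 1
--     total = 0
--     for r in range(1, k // 2 + 1):
--         # numbers with L = k - r bits and r ones: C(L - 1, r - 1)
--         c = 1
--         for i in range(r - 1):
--             c = c * (k - r - 1 - i) // (i + 1)
--         total += c
--     return total % (10**9 + 7)
-- ===== Notes on version B (the rewrite author's own statement) =====
-- stated objective: faster
-- what changed: A enumerates every candidate number of each admissible bit length and tests bitlength+popcount == k; B replaces the whole enumeration by the closed-form binomial-coefficient count of numbers with a given bit length and popcount, summed over the popcount, each coefficient computed by an incremental product. Intended as asymptotically faster; a timing run could not fully confirm it (A times out on all but one input at the largest size; on that one B measured 190x faster).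
import Mathlib
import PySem

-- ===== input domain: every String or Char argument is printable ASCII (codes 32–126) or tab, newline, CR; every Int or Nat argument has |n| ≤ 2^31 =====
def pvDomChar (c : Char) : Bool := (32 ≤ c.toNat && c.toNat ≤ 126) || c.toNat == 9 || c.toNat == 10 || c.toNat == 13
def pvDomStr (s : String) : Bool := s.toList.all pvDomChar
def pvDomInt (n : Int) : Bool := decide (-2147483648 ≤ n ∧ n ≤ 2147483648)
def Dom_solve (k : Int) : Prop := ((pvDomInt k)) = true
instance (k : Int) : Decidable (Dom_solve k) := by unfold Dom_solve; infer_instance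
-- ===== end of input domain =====

-- B replaces A's exponential enumeration of candidate numbers by a closed-form
-- binomial-coefficient sum over the popcount (intended as asymptotically faster;
-- a timing run could not fully confirm it: A times out where B returns).


-- ===== PORT A =====
-- count_func_cal(b): bin(b)[2:], its length plus its count of '1'
def countFuncCal (b : Int) : Int :=
  let bin_b := PySem.Str.slice (PySem.Int.pyBin b) (some 2) none
  let l : Int := PySem.Str.len bin_b
  let r : Int := (PySem.Str.count bin_b "1" : Nat)
  r + l

-- 2**(L-1) / 2**L: every L that reaches the inner loop satisfies 1 ≤ r ≤ L, so the
-- exponents L-1, L are ≥ 0 and `.toNat` is exact there.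
def solve (k : Int) : Int :=
  if k = 1 then 1
  else
    let left := PySem.Int.floordiv (k + 1) 2
    let count : Int :=
      (PySem.List.pyRange left k 1).foldl (fun count L =>
        let r := k - L
        if r < 1 ∨ r > L then count
        else
          (PySem.List.pyRange ((2 : Int) ^ (L - 1).toNat) ((2 : Int) ^ L.toNat) 1).foldl
            (fun count b => if countFuncCal b = k then count + 1 else count) count) 0
    PySem.Int.mod count (10 ^ 9 + 7)

-- ===== PORT B =====
def solve_alt (k : Int) : Int :=
  if k = 1 then 1
  else
    let total : Int :=
      (PySem.List.pyRange 1 (PySem.Int.floordiv k 2 + 1) 1).foldl (fun total r =>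
        let c : Int :=
          (PySem.List.pyRange 0 (r - 1) 1).foldl
            (fun c i => PySem.Int.floordiv (c * (k - r - 1 - i)) (i + 1)) 1
        total + c) 0
    PySem.Int.mod total (10 ^ 9 + 7)

-- ===== PRECONDITION & SPEC =====
def Spec_solve (k : Int) (out : Int) : Prop := out = solve_alt k
instance (k : Int) (out : Int) : Decidable (Spec_solve k out) := by unfold Spec_solve; infer_instance

-- ===== CLAIM (what is proved, stated in full; the proofs are below) =====
def Claim_equal_solve : Prop := ∀ (k : Int), Dom_solve k → Spec_solve k (solve k)

-- ===== LEMMAS AND PROOFS =====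

-- number of '1' bits of a natural number
def onesN : Nat → Nat
  | 0 => 0
  | (m + 1) => (m + 1) % 2 + onesN ((m + 1) / 2)
decreasing_by exact Nat.div_lt_self (Nat.succ_pos m) (by omega)

-- bit length of a natural number
def lenN : Nat → Nat
  | 0 => 0
  | (m + 1) => lenN ((m + 1) / 2) + 1
decreasing_by exact Nat.div_lt_self (Nat.succ_pos m) (by omega)

theorem onesN_def (m : Nat) : onesN m = if m = 0 then 0 else m % 2 + onesN (m / 2) := by
  cases m with
  | zero => simp [onesN]
  | succ n => rw [onesN]; simp

theorem lenN_def (m : Nat) : lenN m = if m = 0 then 0 else lenN (m / 2) + 1 := by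
  cases m with
  | zero => simp [lenN]
  | succ n => rw [lenN]; simp

-- Chars.count with a single-character needle is List.count
theorem count_go_singleton (c : Char) (cs : List Char) (acc fuel : Nat)
    (h : cs.length ≤ fuel) :
    PySem.Chars.count.go [c] fuel cs acc = acc + cs.count c := by
  induction cs generalizing acc fuel with
  | nil => rw [PySem.Chars.count.go.eq_def]; cases fuel <;> simp
  | cons x t ih =>
    cases fuel with
    | zero => simp at h
    | succ f =>
      rw [PySem.Chars.count.go.eq_def]
      simp only [List.length_cons] at h
      by_cases hx : c = x
      · subst hx
        simp only [List.isPrefixOf, BEq.rfl, Bool.and_true, if_pos]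
        rw [show List.drop [c].length (c :: t) = t from rfl]
        rw [ih _ _ (by omega), List.count_cons_self]
        omega
      · have hbe : (c == x) = false := by simp [hx]
        simp only [List.isPrefixOf, hbe, Bool.and_true, Bool.false_eq_true, if_neg,
          not_false_iff]
        rw [ih _ _ (by omega)]
        simp [Ne.symm hx]

theorem chars_count_singleton (c : Char) (cs : List Char) :
    PySem.Chars.count cs [c] = cs.count c := by
  have := count_go_singleton c cs 0 cs.length le_rfl
  simpa [PySem.Chars.count] using this

-- length and '1'-count of the binary digit string
theorem toDigits_count_one (m : Nat) : (Nat.toDigits 2 m).count '1' = onesN m := by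
  induction m using Nat.strong_induction_on with
  | _ m ih =>
    rw [Nat.toDigits_eq_if (by norm_num)]
    by_cases h : m < 2
    · rw [if_pos h]; interval_cases m <;> simp [onesN_def, Nat.digitChar]
    · rw [if_neg h, List.count_append,
        ih (m / 2) (Nat.div_lt_self (by omega) (by omega)), onesN_def m]
      have h2 : m % 2 = 0 ∨ m % 2 = 1 := by omega
      rcases h2 with h2 | h2 <;>
        simp [if_neg (by omega : ¬ m = 0), h2, Nat.digitChar, Nat.add_comm]

theorem toDigits_length (m : Nat) (hm : 1 ≤ m) : (Nat.toDigits 2 m).length = lenN m := by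
  induction m using Nat.strong_induction_on with
  | _ m ih =>
    rw [Nat.toDigits_eq_if (by norm_num)]
    by_cases h : m < 2
    · rw [if_pos h]; interval_cases m <;> simp [lenN_def]
    · rw [if_neg h, List.length_append,
        ih (m / 2) (Nat.div_lt_self (by omega) (by omega)) (by omega), lenN_def m]
      simp [if_neg (by omega : ¬ m = 0)]

-- countFuncCal on a positive natural is bit length + popcount
theorem countFuncCal_natCast (m : Nat) (hm : 1 ≤ m) :
    countFuncCal (m : Int) = ((lenN m : Int) + (onesN m : Int)) := by
  have hnn : ¬ ((m : Int) < 0) := by omega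
  have hbin : (PySem.Int.pyBin (m : Int)).toList = '0' :: 'b' :: Nat.toDigits 2 m := by
    simp [PySem.Int.pyBin, PySem.Int.toBinChars0b, hnn]
  have hslice : (PySem.Str.slice (PySem.Int.pyBin (m : Int)) (some 2) none).toList
      = Nat.toDigits 2 m := by
    simp only [PySem.Str.slice, String.toList_ofList, PySem.Chars.slice_eq_listSlice]
    rw [PySem.List.slice_from _ (by omega : (0:Int) ≤ 2), hbin]
    rfl
  simp only [countFuncCal, PySem.Str.len_eq, PySem.Str.count_eq, hslice]
  have : ("1" : String).toList = ['1'] := rfl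
  rw [this, chars_count_singleton, toDigits_count_one, toDigits_length m hm]
  omega

-- bit length on the dyadic interval [2^n, 2^(n+1))
theorem lenN_interval (n : Nat) : ∀ m, 2 ^ n ≤ m → m < 2 ^ (n + 1) → lenN m = n + 1 := by
  induction n with
  | zero => intro m h1 h2; interval_cases m; simp [lenN_def]
  | succ n ih =>
    intro m h1 h2
    have hp : 2 ^ (n + 1 + 1) = 2 * 2 ^ (n + 1) := by ring
    have hp2 : 2 ^ (n + 1) = 2 * 2 ^ n := by ring
    have hp0 : 0 < 2 ^ n := Nat.two_pow_pos n
    rw [lenN_def, if_neg (by omega), ih (m / 2) (by omega) (by omega)]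

-- popcount of 2^n + x for x < 2^n
theorem onesN_two_pow_add (n : Nat) : ∀ x, x < 2 ^ n → onesN (2 ^ n + x) = onesN x + 1 := by
  induction n with
  | zero => intro x hx; interval_cases x; simp [onesN_def]
  | succ n ih =>
    intro x hx
    have hp2 : 2 ^ (n + 1) = 2 * 2 ^ n := by ring
    have hp0 : 0 < 2 ^ n := Nat.two_pow_pos n
    have e1 : (2 ^ (n + 1) + x) % 2 = x % 2 := by omega
    have e2 : (2 ^ (n + 1) + x) / 2 = 2 ^ n + x / 2 := by omega
    rw [onesN_def, if_neg (by omega), e1, e2, ih (x / 2) (by omega), onesN_def x]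
    by_cases hx0 : x = 0
    · simp [hx0, onesN_def]
    · rw [if_neg hx0]; omega

-- the central count: #{x < 2^n : popcount x = r} = C(n, r)
theorem count_range_onesN (n : Nat) : ∀ r,
    (List.range (2 ^ n)).countP (fun x => onesN x = r) = Nat.choose n r := by
  induction n with
  | zero =>
    intro r
    have h0 : onesN 0 = 0 := by rw [onesN_def]; simp
    rw [pow_zero, List.range_one]
    cases r with
    | zero => simp [h0]
    | succ s => simp [h0]
  | succ n ih =>
    intro r
    have hsplit : List.range (2 ^ (n + 1)) =
        List.range (2 ^ n) ++ (List.range (2 ^ n)).map (fun j => 2 ^ n + j) := by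
      rw [show 2 ^ (n + 1) = 2 ^ n + 2 ^ n by ring, List.range_add]
    rw [hsplit, List.countP_append, List.countP_map, ih r]
    have hcongr : (List.range (2 ^ n)).countP ((fun x => onesN x = r) ∘ (fun j => 2 ^ n + j))
        = (List.range (2 ^ n)).countP (fun j => onesN j + 1 = r) := by
      apply List.countP_congr
      intro j hj
      rw [List.mem_range] at hj
      simp [Function.comp, onesN_two_pow_add n j hj]
    rw [hcongr]
    cases r with
    | zero =>
      have : (List.range (2 ^ n)).countP (fun j => onesN j + 1 = 0) = 0 := by
        apply List.countP_eq_zero.mpr; intro j _; simp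
      rw [this]
      simp
    | succ s =>
      have : (List.range (2 ^ n)).countP (fun j => onesN j + 1 = s + 1)
          = (List.range (2 ^ n)).countP (fun j => onesN j = s) := by
        apply List.countP_congr; intro j _; simp
      rw [this, ih s, Nat.choose_succ_succ']
      omega

-- A's inner loop over [2^n, 2^(n+1)) counts C(n, rn - 1)  (k = (n+1) + rn, rn ≥ 1)
theorem inner_loop_eq (k : Int) (n : Nat) (rn : Nat) (hrn : 1 ≤ rn)
    (hk : k = (n : Int) + 1 + rn) (acc : Int) :
    (PySem.List.pyRange ((2 : Int) ^ n) ((2 : Int) ^ (n + 1)) 1).foldl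
      (fun count b => if countFuncCal b = k then count + 1 else count) acc
    = acc + Nat.choose n (rn - 1) := by
  rw [PySem.List.foldl_ite_add_one (fun b => countFuncCal b = k)]
  congr 1
  rw [PySem.List.pyRange_one, List.countP_map]
  have hlen : (((2 : Int) ^ (n + 1) - (2 : Int) ^ n)).toNat = 2 ^ n := by
    have : ((2 : Int) ^ (n + 1) - (2 : Int) ^ n) = ((2 ^ n : Nat) : Int) := by
      push_cast; ring
    rw [this, Int.toNat_natCast]
  rw [hlen, ← count_range_onesN n (rn - 1)]
  congr 1
  apply List.countP_congr
  intro j hj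
  rw [List.mem_range] at hj
  have hm : ((2 : Int) ^ n + (j : Int)) = (((2 ^ n + j : Nat)) : Int) := by push_cast; ring
  have h1 : 1 ≤ 2 ^ n + j := by have := Nat.two_pow_pos n; omega
  have hcf : countFuncCal ((2 : Int) ^ n + (j : Int))
      = ((lenN (2 ^ n + j) : Int) + (onesN (2 ^ n + j) : Int)) := by
    rw [hm, countFuncCal_natCast _ h1]
  have hlen2 : lenN (2 ^ n + j) = n + 1 := by
    have hp2 : 2 ^ (n + 1) = 2 * 2 ^ n := by ring
    exact lenN_interval n _ (by omega) (by omega)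
  have hones : onesN (2 ^ n + j) = onesN j + 1 := onesN_two_pow_add n j hj
  simp only [Function.comp_apply, decide_eq_true_eq]
  rw [hcf, hlen2, hones]
  omega

-- B's inner product loop computes a binomial coefficient
theorem comb_loop_eq (n : Nat) : ∀ (rr : Nat), rr ≤ n →
    (PySem.List.pyRange 0 (rr : Int) 1).foldl
      (fun c i => PySem.Int.floordiv (c * ((n : Int) - i)) (i + 1)) 1
    = (Nat.choose n rr : Int) := by
  intro rr
  induction rr with
  | zero => intro _; simp [PySem.List.pyRange_one_eq_nil]
  | succ rr ih =>
    intro h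
    have hcast : ((rr + 1 : Nat) : Int) = (rr : Int) + 1 := by push_cast; ring
    rw [hcast, PySem.List.pyRange_one_succ_right (by omega : (0:Int) ≤ rr),
      List.foldl_append]
    rw [ih (by omega)]
    simp only [List.foldl_cons, List.foldl_nil]
    have hsub : ((n : Int) - (rr : Int)) = (((n - rr : Nat)) : Int) := by
      have : rr ≤ n := by omega
      omega
    rw [hsub]
    have hmul : ((Nat.choose n rr : Int) * ((n - rr : Nat) : Int))
        = (((Nat.choose n rr * (n - rr) : Nat)) : Int) := by push_cast; ring
    have hone : ((rr : Int) + 1) = ((rr + 1 : Nat) : Int) := by push_cast; ring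
    rw [hmul, hone, PySem.Int.floordiv_natCast]
    have : Nat.choose n rr * (n - rr) / (rr + 1) = Nat.choose n (rr + 1) :=
      Nat.div_eq_of_eq_mul_left (by omega) (Nat.choose_succ_right_eq n rr).symm
    rw [this]

-- a sum over [a, b) of f (c - L) is the sum of f over the reflected interval
theorem sum_reflect (f : Int → Int) (c : Int) : ∀ (len : Nat) (a b : Int),
    b - a = (len : Int) →
    ((PySem.List.pyRange a b 1).map (fun L => f (c - L))).sum
      = ((PySem.List.pyRange (c - b + 1) (c - a + 1) 1).map f).sum := by
  intro len
  induction len with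
  | zero =>
    intro a b hab
    rw [PySem.List.pyRange_one_eq_nil (by omega), PySem.List.pyRange_one_eq_nil (by omega)]
    simp
  | succ m ih =>
    intro a b hab
    rw [PySem.List.pyRange_one_cons (by omega : a < b)]
    have hsplit : PySem.List.pyRange (c - b + 1) (c - a + 1) 1
        = PySem.List.pyRange (c - b + 1) (c - a) 1 ++ [c - a] := by
      have := PySem.List.pyRange_one_succ_right
        (a := c - b + 1) (b := c - a) (by omega)
      rw [show c - a + 1 = (c - a) + 1 by ring, this]
    rw [hsplit, List.map_cons, List.map_append, List.sum_append, List.sum_cons,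
      ih (a + 1) b (by omega)]
    simp only [List.map_cons, List.map_nil, List.sum_cons, List.sum_nil]
    have : c - (a + 1) + 1 = c - a := by ring
    rw [this]
    ring

-- the per-L term both sides produce
def termB (k r : Int) : Int := (Nat.choose (k - r - 1).toNat (r - 1).toNat : Int)

theorem solve_eq_solve_alt (k : Int) : solve k = solve_alt k := by
  by_cases hk1 : k = 1
  · simp [solve, solve_alt, hk1]
  · simp only [solve, solve_alt, if_neg hk1]
    have hfd1 : PySem.Int.floordiv (k + 1) 2 = (k + 1) / 2 :=
      PySem.Int.floordiv_eq_ediv_of_pos (by omega)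
    have hfd2 : PySem.Int.floordiv k 2 = k / 2 :=
      PySem.Int.floordiv_eq_ediv_of_pos (by omega)
    by_cases hk0 : k ≤ 1
    · -- k ≤ 0: both loops are empty
      rw [PySem.List.pyRange_one_eq_nil (by rw [hfd1]; omega),
        PySem.List.pyRange_one_eq_nil (by rw [hfd2]; omega)]
      rfl
    · -- k ≥ 2
      have hA : (PySem.List.pyRange (PySem.Int.floordiv (k + 1) 2) k 1).foldl
          (fun count L =>
            let r := k - L
            if r < 1 ∨ r > L then count
            else
              (PySem.List.pyRange ((2 : Int) ^ (L - 1).toNat) ((2 : Int) ^ L.toNat) 1).foldl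
                (fun count b => if countFuncCal b = k then count + 1 else count) count) 0
          = 0 + ((PySem.List.pyRange (PySem.Int.floordiv (k + 1) 2) k 1).map
              (fun L => termB k (k - L))).sum := by
        rw [PySem.List.foldl_congr_mem _ _ (fun count L => count + termB k (k - L)) 0 ?_,
          PySem.List.foldl_add]
        intro acc L hL
        rw [PySem.List.mem_pyRange_one] at hL
        obtain ⟨hL1, hL2⟩ := hL
        rw [hfd1] at hL1
        have hLpos : 1 ≤ L := by omega
        have hr1 : 1 ≤ k - L := by omega
        have hr2 : k - L ≤ L := by omega
        simp only [if_neg (by omega : ¬ (k - L < 1 ∨ k - L > L))]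
        set n : Nat := (L - 1).toNat with hn
        have hLn : L = (n : Int) + 1 := by omega
        have hLt : L.toNat = n + 1 := by omega
        set rn : Nat := (k - L).toNat with hrn
        have hkeq : k = (n : Int) + 1 + rn := by omega
        rw [hLt, inner_loop_eq k n rn (by omega) hkeq acc]
        unfold termB
        have e1 : (k - (k - L) - 1).toNat = n := by omega
        have e2 : (k - L - 1).toNat = rn - 1 := by omega
        rw [e1, e2]
      have hB : (PySem.List.pyRange 1 (PySem.Int.floordiv k 2 + 1) 1).foldl
          (fun total r =>
            total + (PySem.List.pyRange 0 (r - 1) 1).foldl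
              (fun c i => PySem.Int.floordiv (c * (k - r - 1 - i)) (i + 1)) 1) 0
          = 0 + ((PySem.List.pyRange 1 (PySem.Int.floordiv k 2 + 1) 1).map
              (fun r => termB k r)).sum := by
        rw [PySem.List.foldl_congr_mem _ _ (fun total r => total + termB k r) 0 ?_,
          PySem.List.foldl_add]
        intro acc r hr
        rw [PySem.List.mem_pyRange_one] at hr
        obtain ⟨hr1, hr2⟩ := hr
        rw [hfd2] at hr2
        have h2r : 2 * r ≤ k := by omega
        set n : Nat := (k - r - 1).toNat with hn
        have hsub : k - r - 1 = (n : Int) := by omega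
        set rr : Nat := (r - 1).toNat with hrr
        have hsub2 : r - 1 = (rr : Int) := by omega
        have hrrn : rr ≤ n := by omega
        simp only [hsub, hsub2]
        rw [comb_loop_eq n rr hrrn]
        unfold termB
        rw [hsub, hsub2]
        simp
      have hrefl := sum_reflect (fun r => termB k r) k (k / 2).toNat
        (PySem.Int.floordiv (k + 1) 2) k (by rw [hfd1]; omega)
      simp only at hrefl
      have e1 : k - k + 1 = (1 : Int) := by ring
      have e2 : k - PySem.Int.floordiv (k + 1) 2 + 1 = PySem.Int.floordiv k 2 + 1 := by
        rw [hfd1, hfd2]; omega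
      rw [hA, hB, hrefl, e1, e2]

-- ===== VERDICT (by name: the statement is the Claim_ definition above) =====
theorem solve_spec : Claim_equal_solve := by
  intro k _
  unfold Spec_solve
  exact solve_eq_solve_alt k
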